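-- pv_equiv track=rewrite | github.com/ArthurBoaro/my-daily-coding-challenge-fcc | January 29, 2026.py | separate_letters_and_numbers
-- ===== SOURCE A (Python) =====
-- def separate_letters_and_numbers(s):
--     last_char = ""
--     new_s = ""
--
--     for char in s:
--         if (last_char.isalpha() and char.isdigit()) or (last_char.isdigit() and char.isalpha()):
--             new_s += "-"
--
--         new_s += char
--         last_char = char
--
--     return new_s
-- ===== SOURCE B (Python) =====
-- def separate_letters_and_numbers(s):
--     # Group s into maximal runs of one category (alpha/digit/other),
--     # then join runs, inserting '-' between adjacent alpha/digit runs.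
--     def cat(c):
--         return 'a' if c.isalpha() else ('d' if c.isdigit() else 'o')
--
--     runs = []
--     i, n = 0, len(s)
--     while i < n:
--         k = cat(s[i])
--         j = i + 1
--         while j < n and cat(s[j]) == k:
--             j += 1
--         runs.append((k, s[i:j]))
--         i = j
--
--     parts = []
--     prev = None
--     for k, text in runs:
--         if prev is not None and {prev, k} == {'a', 'd'}:
--             parts.append('-')
--         parts.append(text)
--         prev = k
--     return ''.join(parts)
-- ===== Notes on version B (the rewrite author's own statement) =====
-- stated objective: alternative
-- what changed: Replaces A's single stateful character loop (carrying the previous character) with a run-based two-phase algorithm: first split the string into maximal runs of one category (alpha/digit/other), then join the runs inserting '-' between directly adjacent alpha and digit runs.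
import Mathlib
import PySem

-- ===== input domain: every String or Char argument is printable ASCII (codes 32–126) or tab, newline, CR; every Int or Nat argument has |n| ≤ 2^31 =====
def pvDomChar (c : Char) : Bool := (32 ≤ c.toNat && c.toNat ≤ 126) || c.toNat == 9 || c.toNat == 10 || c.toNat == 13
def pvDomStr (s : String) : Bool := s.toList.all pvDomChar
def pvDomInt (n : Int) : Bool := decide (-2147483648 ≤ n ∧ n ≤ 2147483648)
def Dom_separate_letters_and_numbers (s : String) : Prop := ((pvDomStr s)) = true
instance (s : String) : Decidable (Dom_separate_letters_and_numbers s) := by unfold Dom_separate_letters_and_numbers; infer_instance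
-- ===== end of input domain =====

-- B replaces A's stateful per-character loop by a run-based algorithm: split into
-- maximal category runs, then join runs with '-' between adjacent alpha/digit runs.

-- ===== PORT A =====
-- A's loop state: last_char ("" initially, modelled as Option Char) and new_s.
def pvStepA (st : Option Char × List Char) (c : Char) : Option Char × List Char :=
  let dash : Bool :=
    match st.1 with
    | none => false
    | some p => (PySem.Chars.isalpha p && PySem.Chars.isdigit c) ||
                (PySem.Chars.isdigit p && PySem.Chars.isalpha c)
  (some c, (if dash then st.2 ++ ['-'] else st.2) ++ [c])

def separate_letters_and_numbers (s : String) : String :=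
  String.mk (s.toList.foldl pvStepA (none, [])).2

-- ===== PORT B =====
-- category: 0 = alpha, 1 = digit, 2 = other
def pvCat (c : Char) : Nat :=
  if PySem.Chars.isalpha c then 0 else if PySem.Chars.isdigit c then 1 else 2

-- maximal runs of equal category (the two while loops of Source B: span is the inner scan)
def pvRuns : List Char → List (Nat × List Char)
  | [] => []
  | c :: l =>
    (pvCat c, c :: l.takeWhile (fun d => pvCat d == pvCat c)) ::
      pvRuns (l.dropWhile (fun d => pvCat d == pvCat c))
termination_by l => l.length
decreasing_by
  simpa using Nat.lt_succ_of_le (List.length_dropWhile_le _ _)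

-- join the runs, inserting '-' between an alpha run and a digit run (Source B's second loop)
def pvDash (p k : Nat) : Bool := (p == 0 && k == 1) || (p == 1 && k == 0)

def pvEmitRest (p : Nat) : List (Nat × List Char) → List Char
  | [] => []
  | r :: rs => (if pvDash p r.1 then ['-'] else []) ++ r.2 ++ pvEmitRest r.1 rs

def pvEmit : List (Nat × List Char) → List Char
  | [] => []
  | r :: rs => r.2 ++ pvEmitRest r.1 rs

def separate_letters_and_numbers_alt (s : String) : String :=
  String.mk (pvEmit (pvRuns s.toList))

-- ===== PRECONDITION & SPEC =====
def Spec_separate_letters_and_numbers (s : String) (out : String) : Prop := out = separate_letters_and_numbers_alt s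
instance (s : String) (out : String) : Decidable (Spec_separate_letters_and_numbers s out) := by unfold Spec_separate_letters_and_numbers; infer_instance

-- ===== CLAIM (what is proved, stated in full; the proofs are below) =====
def Claim_equal_separate_letters_and_numbers : Prop := ∀ (s : String), Dom_separate_letters_and_numbers s → Spec_separate_letters_and_numbers s (separate_letters_and_numbers s)

-- ===== LEMMAS AND PROOFS =====

-- A's boundary test as a function
def pvBound (last : Option Char) (c : Char) : Bool :=
  match last with
  | none => false
  | some p => (PySem.Chars.isalpha p && PySem.Chars.isdigit c) ||
              (PySem.Chars.isdigit p && PySem.Chars.isalpha c)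

-- the sequence A appends after having seen `last`
def pvRest (last : Option Char) : List Char → List Char
  | [] => []
  | c :: l => (if pvBound last c then ['-'] else []) ++ c :: pvRest (some c) l

theorem pvFoldA (l : List Char) : ∀ (last : Option Char) (acc : List Char),
    (l.foldl pvStepA (last, acc)).2 = acc ++ pvRest last l := by
  induction l with
  | nil => intro last acc; simp [pvRest]
  | cons c l ih =>
    intro last acc
    simp only [List.foldl_cons, pvStepA, pvRest, pvBound, ih]
    cases last <;> simp <;> split <;> simp

theorem pvAlphaDigit (c : Char) (ha : PySem.Chars.isalpha c = true) :
    PySem.Chars.isdigit c = false := by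
  by_contra hd
  rw [Bool.not_eq_false] at hd
  simp only [PySem.Chars.isalpha, PySem.Chars.isupper, PySem.Chars.islower,
    PySem.Chars.isdigit, Char.le_def, Bool.or_eq_true, Bool.and_eq_true,
    decide_eq_true_eq] at ha hd
  rcases ha with ⟨h1, h2⟩ | ⟨h1, h2⟩ <;> obtain ⟨h3, h4⟩ := hd <;>
    simp_all [UInt32.le_iff_toNat_le] <;> omega

theorem pvBound_eq_dash (c d : Char) : pvBound (some c) d = pvDash (pvCat c) (pvCat d) := by
  simp only [pvBound, pvCat, pvDash]
  cases hac : PySem.Chars.isalpha c <;> cases had : PySem.Chars.isalpha d <;>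
    cases hdc : PySem.Chars.isdigit c <;> cases hdd : PySem.Chars.isdigit d <;>
      first
        | decide
        | exact Bool.noConfusion ((pvAlphaDigit c hac).symm.trans hdc)
        | exact Bool.noConfusion ((pvAlphaDigit d had).symm.trans hdd)

theorem pvDash_self (k : Nat) : pvDash k k = false := by
  match k with
  | 0 => decide
  | 1 => decide
  | n + 2 => simp [pvDash]

-- same category ⇒ no dash between the two characters
theorem pvBound_same {c d : Char} (h : pvCat d = pvCat c) : pvBound (some c) d = false := by
  rw [pvBound_eq_dash, h]
  exact pvDash_self _

-- E2: within/after a run, A's tail equals the run text plus the joined remaining runs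
theorem pvRest_span (l : List Char) : ∀ (c : Char),
    pvRest (some c) l =
      l.takeWhile (fun d => pvCat d == pvCat c) ++
        pvEmitRest (pvCat c) (pvRuns (l.dropWhile (fun d => pvCat d == pvCat c))) := by
  induction l with
  | nil => intro c; simp [pvRest, pvRuns, pvEmitRest]
  | cons d l ih =>
    intro c
    by_cases h : pvCat d = pvCat c
    · have hpd : (pvCat d == pvCat c) = true := by simp [h]
      have hpred : (fun e : Char => pvCat e == pvCat c) = (fun e => pvCat e == pvCat d) := by
        funext e; rw [h]
      simp only [pvRest, pvBound_same h, Bool.false_eq_true, if_false, List.nil_append,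
        List.takeWhile_cons, List.dropWhile_cons, hpd, if_true]
      rw [hpred, ih d, h, List.cons_append]
    · have hne : (pvCat d == pvCat c) = false := by simp [h]
      simp only [pvRest, List.takeWhile_cons, List.dropWhile_cons, hne, Bool.false_eq_true,
        if_false, pvRuns, pvEmitRest, pvBound_eq_dash, List.nil_append]
      simp [ih d]

-- E1: B = A's tail from the empty last_char
theorem pvEmit_eq_rest (l : List Char) : pvEmit (pvRuns l) = pvRest none l := by
  cases l with
  | nil => simp [pvRuns, pvEmit, pvRest]
  | cons c l =>
    rw [pvRuns, pvEmit]
    simp only [pvRest, pvBound]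
    simp [pvRest_span l c]


-- ===== VERDICT (by name: the statement is the Claim_ definition above) =====
theorem separate_letters_and_numbers_spec : Claim_equal_separate_letters_and_numbers := by
  intro s _
  unfold Spec_separate_letters_and_numbers separate_letters_and_numbers separate_letters_and_numbers_alt
  rw [pvFoldA, pvEmit_eq_rest]
  rfl
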